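-- pv_equiv track=rewrite | github.com/andrus777/pythonProject | module_3_4.py | is_intersection
-- ===== SOURCE A (Python) =====
-- def is_intersection(word1, word2, count):
--     result = False
--     for i in range(0, len(word1) - count + 1):
--         test_str = (word1[i: i + count]).upper()
--         if test_str in word2.upper():
--             result = True
--             break
--     return result
-- ===== SOURCE B (Python) =====
-- def is_intersection(word1, word2, count):
--     n = len(word1)
--     if count <= 0:
--         return True
--     if count > n:
--         return False
--     w1 = word1.upper()
--     w2 = word2.upper()
--     subs = set()
--     for j in range(len(w2) - count + 1):
--         subs.add(w2[j:j + count])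
--     return any(w1[i:i + count] in subs for i in range(n - count + 1))
-- ===== Notes on version B (the rewrite author's own statement) =====
-- stated objective: alternative
-- what changed: Instead of running a substring search of each word1 window inside word2 on every iteration, B precomputes the set of word2's uppercase length-count substrings once and scans word1 with set lookups, with direct returns for count <= 0 (always True) and count > len(word1) (always False).
import Mathlib
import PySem

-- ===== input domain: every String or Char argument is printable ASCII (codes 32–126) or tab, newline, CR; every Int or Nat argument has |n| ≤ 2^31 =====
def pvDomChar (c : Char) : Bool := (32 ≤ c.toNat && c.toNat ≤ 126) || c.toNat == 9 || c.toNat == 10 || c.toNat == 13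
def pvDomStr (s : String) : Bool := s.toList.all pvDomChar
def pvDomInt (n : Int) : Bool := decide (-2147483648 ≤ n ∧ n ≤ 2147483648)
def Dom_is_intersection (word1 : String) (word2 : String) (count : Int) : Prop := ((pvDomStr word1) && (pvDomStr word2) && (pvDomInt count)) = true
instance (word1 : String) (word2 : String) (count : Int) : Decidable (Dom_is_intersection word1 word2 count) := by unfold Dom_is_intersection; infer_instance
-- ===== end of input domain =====

-- B replaces A's per-position substring search inside word2 by one precomputed set of word2's
-- length-count substrings and a single membership-checked scan of word1 (objective: alternative).

-- ===== PORT A =====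
-- the for-loop over range(0, len(word1)-count+1) with its early 'break', as recursion on the
-- running index i (result stays False until a hit, then the loop stops)
def isInterLoopA (w1 : List Char) (w2 : List Char) (count : Int) (i stop : Int) : Bool :=
  if _h : i < stop then
    if PySem.Chars.isIn (PySem.Chars.upper (PySem.Chars.slice w1 (some i) (some (i + count))))
        (PySem.Chars.upper w2) then true
    else isInterLoopA w1 w2 count (i + 1) stop
  else false
termination_by (stop - i).toNat
decreasing_by omega

def is_intersection (word1 : String) (word2 : String) (count : Int) : Bool :=
  isInterLoopA word1.toList word2.toList count 0
    ((word1.toList.length : Int) - count + 1)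

-- ===== PORT B =====
-- nonnegative slice w[j:j+count] is written via PySem.Chars.slice, exact as in Source B
def is_intersection_alt (word1 : String) (word2 : String) (count : Int) : Bool :=
  let n : Int := (word1.toList.length : Int)
  if count ≤ 0 then true
  else if n < count then false
  else
    let w1 := PySem.Chars.upper word1.toList
    let w2 := PySem.Chars.upper word2.toList
    let subs := PySem.Set.ofList
      ((PySem.List.pyRange 0 ((w2.length : Int) - count + 1)).map
        (fun j => PySem.Chars.slice w2 (some j) (some (j + count))))
    (PySem.List.pyRange 0 (n - count + 1)).any
      (fun i => PySem.Set.contains subs (PySem.Chars.slice w1 (some i) (some (i + count))))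

-- ===== PRECONDITION & SPEC =====
def Spec_is_intersection (word1 : String) (word2 : String) (count : Int) (out : Bool) : Prop := out = is_intersection_alt word1 word2 count
instance (word1 : String) (word2 : String) (count : Int) (out : Bool) : Decidable (Spec_is_intersection word1 word2 count out) := by unfold Spec_is_intersection; infer_instance

-- ===== CLAIM (what is proved, stated in full; the proofs are below) =====
def Claim_equal_is_intersection : Prop := ∀ (word1 : String) (word2 : String) (count : Int), Dom_is_intersection word1 word2 count → Spec_is_intersection word1 word2 count (is_intersection word1 word2 count)

-- ===== LEMMAS AND PROOFS =====

-- A's loop-with-break returns true iff some index in the range hits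
theorem isInterLoopA_eq_any (w1 w2 : List Char) (c : Int) (i stop : Int) :
    isInterLoopA w1 w2 c i stop =
      (PySem.List.pyRange i stop).any (fun i => PySem.Chars.isIn
        (PySem.Chars.upper (PySem.Chars.slice w1 (some i) (some (i + c))))
        (PySem.Chars.upper w2)) := by
  fun_induction isInterLoopA with
  | case1 i h hit =>
    rw [PySem.List.pyRange_one_cons h]
    simp only [PySem.Chars.slice_eq_listSlice] at hit
    simp [hit]
  | case2 i h hit ih =>
    rw [PySem.List.pyRange_one_cons h]
    simp only [PySem.Chars.slice_eq_listSlice] at hit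
    simp [List.any_cons, ih, Bool.eq_false_iff.2 hit]
  | case3 i h =>
    rw [PySem.List.pyRange_one_eq_nil (by omega)]
    rfl

theorem is_intersection_eq (word1 word2 : String) (count : Int) :
    is_intersection word1 word2 count = is_intersection_alt word1 word2 count := by
  unfold is_intersection is_intersection_alt
  rw [isInterLoopA_eq_any]

  set w1l := word1.toList with hw1l
  set w2l := word2.toList with hw2l
  set n : Nat := w1l.length with hn
  by_cases hc0 : count ≤ 0
  · -- count ≤ 0: A finds the empty slice at i = n - count; B returns True
    simp only [if_pos hc0]
    rw [List.any_eq_true]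
    refine ⟨(n : Int) - count, ?_, ?_⟩
    · rw [PySem.List.mem_pyRange_one]; omega
    · have hb : ((n : Int) - count + count) = ((n : Int)) := by ring
      rw [hb, PySem.Chars.slice_eq_listSlice, PySem.List.slice_toNat]
      · have h0 : ((n : Int)).toNat - (((n : Int) - count)).toNat = 0 := by omega
        rw [h0]
        simp [PySem.Chars.upper, PySem.Chars.isIn_nil]
      · omega
      · omega
  · simp only [if_neg hc0]
    obtain ⟨k, hk⟩ : ∃ k : Nat, count = (k : Int) := ⟨count.toNat, by omega⟩
    have hkpos : 0 < k := by omega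
    by_cases hcn : (n : Int) < count
    · -- count > n: both ranges make A scan nothing; B returns False
      simp only [if_pos hcn]
      rw [List.any_eq_false]
      intro i hi
      rw [PySem.List.mem_pyRange_one] at hi
      exact absurd hi (by omega)
    · simp only [if_neg hcn]
      set W1 := PySem.Chars.upper w1l with hW1
      set W2 := PySem.Chars.upper w2l with hW2
      have hW1len : W1.length = n := by simp [hW1, PySem.Chars.upper, hn]
      set m : Nat := W2.length with hm
      rw [Bool.eq_iff_iff, List.any_eq_true, List.any_eq_true]
      apply exists_congr; intro i
      apply and_congr_right; intro hi
      rw [PySem.List.mem_pyRange_one] at hi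
      obtain ⟨j, hj⟩ : ∃ j : Nat, i = (j : Int) := ⟨i.toNat, by omega⟩
      subst hj hk
      simp only [PySem.Chars.slice_eq_listSlice]
      rw [PySem.List.slice_natCast_add w1l j k, PySem.List.slice_natCast_add W1 j k]
      have hmapcomm : PySem.Chars.upper ((w1l.drop j).take k) = (W1.drop j).take k := by
        simp [hW1, PySem.Chars.upper, List.map_take, List.map_drop]
      rw [hmapcomm]
      have hlen : ((W1.drop j).take k).length = k := by
        simp [List.length_take, List.length_drop, hW1len]; omega
      -- the substring sub := (W1.drop j).take k has length k > 0
      constructor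
      · intro hIsIn
        -- sub is an infix of W2, hence equal to one of the precomputed slices
        rcases (PySem.Chars.exists_prefix_drop_iff_isIn _ _).2 hIsIn with ⟨j', hpre⟩
        have heq : (W1.drop j).take k = (W2.drop j').take k := by
          have := List.prefix_iff_eq_take.1 hpre
          rw [hlen] at this; exact this
        have hj'le : j' + k ≤ m := by
          have h2 : ((W2.drop j').take k).length = k := by rw [← heq, hlen]
          simp [List.length_take, List.length_drop, ← hm] at h2
          omega
        rw [PySem.Set.contains_iff, PySem.Set.mem_ofList, List.mem_map]
        refine ⟨(j' : Int), ?_, ?_⟩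
        · rw [PySem.List.mem_pyRange_one]; omega
        · rw [PySem.List.slice_natCast_add W2 j' k, ← heq]
      · intro hmem
        rw [PySem.Set.contains_iff, PySem.Set.mem_ofList, List.mem_map] at hmem
        rcases hmem with ⟨i', hi', heq⟩
        rw [PySem.List.mem_pyRange_one] at hi'
        obtain ⟨j', hj'⟩ : ∃ j' : Nat, i' = (j' : Int) := ⟨i'.toNat, by omega⟩
        subst hj'
        rw [PySem.List.slice_natCast_add W2 j' k] at heq
        rw [← heq]
        exact (PySem.Chars.exists_prefix_drop_iff_isIn _ _).1 ⟨j', List.take_prefix _ _⟩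

-- ===== VERDICT (by name: the statement is the Claim_ definition above) =====
theorem is_intersection_spec : Claim_equal_is_intersection := by
  intro word1 word2 count _
  unfold Spec_is_intersection
  exact is_intersection_eq word1 word2 count
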